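-- pv_equiv track=rewrite | github.com/Conair94/liars-poker | Liars poker/poker_math_exact.py | _evaluate
-- ===== SOURCE A (Python) =====
-- HIGH_CARD       = 0
--
-- PAIR            = 1
--
-- TWO_PAIR        = 2
--
-- THREE_OF_A_KIND = 3
--
-- STRAIGHT        = 4
--
-- FLUSH           = 5
--
-- FULL_HOUSE      = 6
--
-- FOUR_OF_A_KIND  = 7
--
-- STRAIGHT_FLUSH  = 8
--
-- ROYAL_FLUSH     = 9
--
-- def _evaluate(card_indices):
--     """
--     Evaluate the best 5-card hand from card_indices (list of ints 0-51).
--     Returns an int in 0..9 (HIGH_CARD..ROYAL_FLUSH).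
--     """
--     ranks = [c >> 2 for c in card_indices]   # c // 4
--     suits = [c & 3  for c in card_indices]   # c %  4
--
--     # Rank frequency table
--     rc = [0] * 13
--     for r in ranks:
--         rc[r] += 1
--
--     # Suit frequency table
--     sc = [0] * 4
--     for s in suits:
--         sc[s] += 1
--
--     # Flush suit (-1 if none)
--     flush_suit = -1
--     for s in range(4):
--         if sc[s] >= 5:
--             flush_suit = s
--             break
--
--     # --- Straight Flush / Royal Flush ---
--     if flush_suit >= 0:
--         fr = sorted(
--             {c >> 2 for c in card_indices if (c & 3) == flush_suit},
--             reverse=True,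
--         )
--         ext = fr + ([-1] if 12 in fr else [])
--         for i in range(len(ext) - 4):
--             if ext[i] - ext[i + 4] == 4:
--                 return ROYAL_FLUSH if ext[i] == 12 else STRAIGHT_FLUSH
--
--     # --- Four of a Kind ---
--     if max(rc) >= 4:
--         return FOUR_OF_A_KIND
--
--     # --- Full House ---
--     sorted_rc = sorted(rc, reverse=True)
--     if sorted_rc[0] >= 3 and sorted_rc[1] >= 2:
--         return FULL_HOUSE
--
--     # --- Flush ---
--     if flush_suit >= 0:
--         return FLUSH
--
--     # --- Straight ---
--     ur = sorted({r for r in ranks}, reverse=True)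
--     ext = ur + ([-1] if 12 in ur else [])
--     for i in range(len(ext) - 4):
--         if ext[i] - ext[i + 4] == 4:
--             return STRAIGHT
--
--     # --- Three of a Kind ---
--     if sorted_rc[0] >= 3:
--         return THREE_OF_A_KIND
--
--     # --- Two Pair ---
--     if sorted_rc[0] >= 2 and sorted_rc[1] >= 2:
--         return TWO_PAIR
--
--     # --- Pair ---
--     if sorted_rc[0] >= 2:
--         return PAIR
--
--     return HIGH_CARD
-- ===== SOURCE B (Python) =====
-- HIGH_CARD       = 0
-- PAIR            = 1
-- TWO_PAIR        = 2
-- THREE_OF_A_KIND = 3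
-- STRAIGHT        = 4
-- FLUSH           = 5
-- FULL_HOUSE      = 6
-- FOUR_OF_A_KIND  = 7
-- STRAIGHT_FLUSH  = 8
-- ROYAL_FLUSH     = 9
--
--
-- def _has_straight(h):
--     """h: 13 rank-presence booleans; True iff 5 consecutive ranks (ace may play low)."""
--     return (h[12] and h[0] and h[1] and h[2] and h[3]) or any(
--         h[t] and h[t - 1] and h[t - 2] and h[t - 3] and h[t - 4] for t in range(4, 13)
--     )
--
--
-- def _evaluate(card_indices):
--     """
--     Evaluate the best 5-card hand from card_indices (list of ints 0-51).
--     Returns an int in 0..9 (HIGH_CARD..ROYAL_FLUSH).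
--     """
--     rc = [0] * 13
--     sc = [0] * 4
--     for c in card_indices:
--         rc[c >> 2] += 1
--         sc[c & 3] += 1
--
--     flush_suit = next((s for s in range(4) if sc[s] >= 5), -1)
--
--     if flush_suit >= 0:
--         fh = [False] * 13
--         for c in card_indices:
--             if c & 3 == flush_suit:
--                 fh[c >> 2] = True
--         if fh[8] and fh[9] and fh[10] and fh[11] and fh[12]:
--             return ROYAL_FLUSH
--         if _has_straight(fh):
--             return STRAIGHT_FLUSH
--
--     pairs = trips = quads = 0
--     for n in rc:
--         if n >= 2:
--             pairs += 1
--         if n >= 3: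
--             trips += 1
--         if n >= 4:
--             quads += 1
--
--     if quads >= 1:
--         return FOUR_OF_A_KIND
--     if trips >= 1 and pairs >= 2:
--         return FULL_HOUSE
--     if flush_suit >= 0:
--         return FLUSH
--     if _has_straight([n > 0 for n in rc]):
--         return STRAIGHT
--     if trips >= 1:
--         return THREE_OF_A_KIND
--     if pairs >= 2:
--         return TWO_PAIR
--     if pairs >= 1:
--         return PAIR
--     return HIGH_CARD
-- ===== Notes on version B (the rewrite author's own statement) =====
-- stated objective: alternative
-- what changed: B drops A's sorting and set construction entirely: instead of sorting the distinct ranks and scanning for a difference-of-4 window (and sorting the frequency table for order statistics), B fills boolean rank-presence tables and checks the 10 fixed straight windows (broadway down to the wheel) directly, and classifies pairs/trips/quads by counting ranks whose frequency reaches 2/3/4 in one pass over the 13 counters.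
-- outside the precondition, e.g. on _evaluate([-4]): A returns 0, B returns 0
import Mathlib
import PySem

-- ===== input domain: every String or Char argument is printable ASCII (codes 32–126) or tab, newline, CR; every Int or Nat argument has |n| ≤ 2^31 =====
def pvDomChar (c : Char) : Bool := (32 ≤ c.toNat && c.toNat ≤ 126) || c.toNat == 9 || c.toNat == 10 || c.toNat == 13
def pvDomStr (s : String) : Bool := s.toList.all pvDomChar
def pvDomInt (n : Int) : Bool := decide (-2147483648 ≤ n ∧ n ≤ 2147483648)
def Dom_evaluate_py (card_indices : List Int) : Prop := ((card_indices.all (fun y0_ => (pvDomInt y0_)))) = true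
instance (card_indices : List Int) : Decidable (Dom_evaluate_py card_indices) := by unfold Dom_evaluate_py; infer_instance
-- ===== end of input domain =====

-- B replaces A's sort-the-distinct-ranks-and-scan and sorted-frequency order statistics by fixed
-- presence windows and count-of-counts, with no sorting or set construction (objective: alternative).

-- ===== PORT A =====
-- A's scan loop 'for i in range(len(ext) - 4): if ext[i] - ext[i + 4] == 4: return …':
-- returns the first ext[i] with ext[i] - ext[i+4] == 4 (the loop's hit), none if no i hits.
def pvScan5 : List Int → Option Int
  | a :: rest =>
    match rest.drop 3 with
    | b :: _ => if a - b = 4 then some a else pvScan5 rest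
    | [] => none
  | [] => none

def evaluate_py (card_indices : List Int) : Int :=
  let ranks := card_indices.map (fun c : Int => c >>> (2 : Nat))
  let suits := card_indices.map (fun c => PySem.Int.band c 3)
  -- rc[r] += 1 / sc[s] += 1 with Python list indexing (negative wrap; IndexError outside Pre_)
  let rc := ranks.foldl
    (fun a r => PySem.List.pySetD a r (PySem.List.pyGetD a r 0 + 1)) (List.replicate 13 (0:Int))
  let sc := suits.foldl
    (fun a s => PySem.List.pySetD a s (PySem.List.pyGetD a s 0 + 1)) (List.replicate 4 (0:Int))
  -- 'for s in range(4): if sc[s] >= 5: flush_suit = s; break' unrolled (range(4) is fixed)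
  let flushSuit : Int :=
    if 5 ≤ PySem.List.pyGetD sc 0 0 then 0
    else if 5 ≤ PySem.List.pyGetD sc 1 0 then 1
    else if 5 ≤ PySem.List.pyGetD sc 2 0 then 2
    else if 5 ≤ PySem.List.pyGetD sc 3 0 then 3
    else -1
  -- straight-flush / royal-flush block; 'some v' models the early return
  let sfRes : Option Int :=
    if 0 ≤ flushSuit then
      let fr := PySem.List.sorted
        (PySem.Set.ofList ((card_indices.filter
          (fun c : Int => PySem.Int.band c 3 == flushSuit)).map (fun c : Int => c >>> (2 : Nat))))
        (fun x => x) true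
      let ext := fr ++ (if (12 : Int) ∈ fr then [-1] else [])
      match pvScan5 ext with
      | some t => some (if t = 12 then 9 else 8)
      | none => none
    else none
  -- 'sfRes.getD rest': the early returns of the straight-flush block, else fall through
  sfRes.getD (
    -- max(rc): rc always has 13 entries, so Python's max never raises here
    if 4 ≤ (PySem.List.max? rc (fun x => x)).getD 0 then 7
    else
      let sorted_rc := PySem.List.sorted rc (fun x => x) true
      if 3 ≤ PySem.List.pyGetD sorted_rc 0 0 ∧ 2 ≤ PySem.List.pyGetD sorted_rc 1 0 then 6
      else if 0 ≤ flushSuit then 5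
      else
        let ur := PySem.List.sorted (PySem.Set.ofList ranks) (fun x => x) true
        let ext2 := ur ++ (if (12 : Int) ∈ ur then [-1] else [])
        if (pvScan5 ext2).isSome then 4
        else if 3 ≤ PySem.List.pyGetD sorted_rc 0 0 then 3
        else if 2 ≤ PySem.List.pyGetD sorted_rc 0 0 ∧ 2 ≤ PySem.List.pyGetD sorted_rc 1 0 then 2
        else if 2 ≤ PySem.List.pyGetD sorted_rc 0 0 then 1
        else 0)

-- ===== PORT B =====
-- Source B's _has_straight(h): wheel window or one of the 9 windows topped by t = 4..12
def pvHasStraight (h : List Bool) : Bool :=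
  (PySem.List.pyGetD h 12 false && PySem.List.pyGetD h 0 false && PySem.List.pyGetD h 1 false
    && PySem.List.pyGetD h 2 false && PySem.List.pyGetD h 3 false) ||
  (PySem.List.pyRange 4 13 1).any (fun t =>
    PySem.List.pyGetD h t false && PySem.List.pyGetD h (t - 1) false
      && PySem.List.pyGetD h (t - 2) false && PySem.List.pyGetD h (t - 3) false
      && PySem.List.pyGetD h (t - 4) false)

def evaluate_py_alt (card_indices : List Int) : Int :=
  -- one loop filling both tables (Python list indexing: negative wrap; IndexError outside Pre_)
  let rcsc := card_indices.foldl
    (fun (p : List Int × List Int) (c : Int) =>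
      (PySem.List.pySetD p.1 (c >>> (2 : Nat)) (PySem.List.pyGetD p.1 (c >>> (2 : Nat)) 0 + 1),
       PySem.List.pySetD p.2 (PySem.Int.band c 3) (PySem.List.pyGetD p.2 (PySem.Int.band c 3) 0 + 1)))
    (List.replicate 13 (0:Int), List.replicate 4 (0:Int))
  let rc := rcsc.1
  let sc := rcsc.2
  -- next((s for s in range(4) if sc[s] >= 5), -1) with the fixed range(4) unrolled
  let flushSuit : Int :=
    if 5 ≤ PySem.List.pyGetD sc 0 0 then 0
    else if 5 ≤ PySem.List.pyGetD sc 1 0 then 1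
    else if 5 ≤ PySem.List.pyGetD sc 2 0 then 2
    else if 5 ≤ PySem.List.pyGetD sc 3 0 then 3
    else -1
  -- royal / straight-flush block; 'some v' models the early return
  let sfRes : Option Int :=
    if 0 ≤ flushSuit then
      let fh := card_indices.foldl
        (fun a c => if PySem.Int.band c 3 == flushSuit
          then PySem.List.pySetD a (c >>> (2 : Nat)) true else a)
        (List.replicate 13 false)
      if PySem.List.pyGetD fh 8 false && PySem.List.pyGetD fh 9 false
          && PySem.List.pyGetD fh 10 false && PySem.List.pyGetD fh 11 false
          && PySem.List.pyGetD fh 12 false then some 9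
      else if pvHasStraight fh then some 8
      else none
    else none
  sfRes.getD (
    let pairs := rc.foldl (fun acc n => if 2 ≤ n then acc + 1 else acc) (0 : Int)
    let trips := rc.foldl (fun acc n => if 3 ≤ n then acc + 1 else acc) (0 : Int)
    let quads := rc.foldl (fun acc n => if 4 ≤ n then acc + 1 else acc) (0 : Int)
    if 1 ≤ quads then 7
    else if 1 ≤ trips ∧ 2 ≤ pairs then 6
    else if 0 ≤ flushSuit then 5
    else if pvHasStraight (rc.map (fun n => decide (0 < n))) then 4
    else if 1 ≤ trips then 3
    else if 2 ≤ pairs then 2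
    else if 1 ≤ pairs then 1
    else 0)

-- ===== PRECONDITION & SPEC =====
-- Pre_ restricts to the natural card domain 0..51: outside it A raises IndexError when some
-- rank c >> 2 falls outside -13..12, and on negative cards (-52..-1) A returns a value only
-- through Python's accidental negative-index wraparound into the count tables.
def Pre_evaluate_py (card_indices : List Int) : Prop :=
  ∀ c ∈ card_indices, 0 ≤ c ∧ c ≤ 51
instance (card_indices : List Int) : Decidable (Pre_evaluate_py card_indices) := by
  unfold Pre_evaluate_py; infer_instance
def pvWitness_evaluate_py : List Int := [0, 5, 14, 23, 33]

def Spec_evaluate_py (card_indices : List Int) (out : Int) : Prop := out = evaluate_py_alt card_indices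
instance (card_indices : List Int) (out : Int) : Decidable (Spec_evaluate_py card_indices out) := by
  unfold Spec_evaluate_py; infer_instance

-- ===== CLAIM (what is proved, stated in full; the proofs are below) =====
def Claim_equal_evaluate_py : Prop := ∀ (card_indices : List Int), Dom_evaluate_py card_indices → Pre_evaluate_py card_indices → Spec_evaluate_py card_indices (evaluate_py card_indices)

-- ===== LEMMAS AND PROOFS =====

-- The strictly-descending list of those r in 12..0 whose flag is set.
def pvBuild : List (Int × Bool) → List Int
  | [] => []
  | (r, x) :: t => if x then r :: pvBuild t else pvBuild t

def pvExtB (l : List (Int × Bool)) : List Int :=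
  pvBuild l ++ (if (12 : Int) ∈ pvBuild l then [-1] else [])

-- Kernel-checked core: on every 13-bit rank-presence pattern, A's sorted-scan straight(-flush)
-- result equals B's fixed-window result.
set_option maxHeartbeats 4000000 in
theorem pvMaster : ∀ x0 x1 x2 x3 x4 x5 x6 x7 x8 x9 x10 x11 x12 : Bool,
    (match pvScan5 (pvExtB [(12,x12),(11,x11),(10,x10),(9,x9),(8,x8),(7,x7),(6,x6),(5,x5),(4,x4),(3,x3),(2,x2),(1,x1),(0,x0)]) with
     | some t => some (if t = 12 then (9 : Int) else 8)
     | none => none) =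
      (if x8 && x9 && x10 && x11 && x12 then some 9
       else if (x12 && x0 && x1 && x2 && x3) ||
         ((x4 && x3 && x2 && x1 && x0) || ((x5 && x4 && x3 && x2 && x1) ||
         ((x6 && x5 && x4 && x3 && x2) || ((x7 && x6 && x5 && x4 && x3) ||
         ((x8 && x7 && x6 && x5 && x4) || ((x9 && x8 && x7 && x6 && x5) ||
         ((x10 && x9 && x8 && x7 && x6) || ((x11 && x10 && x9 && x8 && x7) ||
         (x12 && x11 && x10 && x9 && x8))))))))) then some 8 else none) := by
  decide

lemma pvFoldIncr_len (g : Int → Int) (l : List Int) (a : List Int) :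
    (l.foldl (fun acc c => PySem.List.pySetD acc (g c) (PySem.List.pyGetD acc (g c) 0 + 1)) a).length = a.length := by
  induction l generalizing a with
  | nil => rfl
  | cons c t ih => simp only [List.foldl_cons]; rw [ih]; exact PySem.List.length_pySetD ..

lemma pvFoldIncr_getD (g : Int → Int) (n : Nat) (l : List Int)
    (hg : ∀ c ∈ l, 0 ≤ g c ∧ g c < (n : Int)) (a : List Int) (ha : a.length = n) (j : Nat) (_hj : j < n) :
    PySem.List.pyGetD (l.foldl (fun acc c => PySem.List.pySetD acc (g c) (PySem.List.pyGetD acc (g c) 0 + 1)) a) (j : Int) 0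
      = PySem.List.pyGetD a (j : Int) 0 + ((l.map g).count (j : Int) : Int) := by
  induction l generalizing a with
  | nil => simp
  | cons c t ih =>
    obtain ⟨h0, h1⟩ := hg c (List.mem_cons_self ..)
    simp only [List.foldl_cons]
    rw [ih (fun x hx => hg x (List.mem_cons_of_mem _ hx)) _
      (by rw [PySem.List.length_pySetD, ha])]
    obtain ⟨m, hm⟩ : ∃ m : Nat, g c = (m : Int) := ⟨(g c).toNat, (Int.toNat_of_nonneg h0).symm⟩
    have hmn : m < a.length := by omega
    rw [hm, PySem.List.pyGetD_pySetD_natCast a m j _ 0 hmn]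
    simp only [List.map_cons, List.count_cons, hm]
    by_cases hje : j = m
    · subst hje
      simp only [beq_self_eq_true, if_pos]
      push_cast
      ring
    · rw [if_neg hje]
      have hne : ((m : Int) == (j : Int)) = false := by
        simp only [beq_eq_false_iff_ne, ne_eq, Int.natCast_inj]
        omega
      rw [hne]
      push_cast
      ring

lemma pvFoldMark_getD (p : Int → Bool) (g : Int → Int) (n : Nat) (l : List Int)
    (hg : ∀ c ∈ l, p c → 0 ≤ g c ∧ g c < (n : Int)) (a : List Bool) (ha : a.length = n) (j : Nat) (_hj : j < n) :
    PySem.List.pyGetD (l.foldl (fun acc c => if p c then PySem.List.pySetD acc (g c) true else acc) a) (j : Int) false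
      = (PySem.List.pyGetD a (j : Int) false || decide ((j : Int) ∈ (l.filter p).map g)) := by
  induction l generalizing a with
  | nil => simp
  | cons c t ih =>
    simp only [List.foldl_cons]
    by_cases hp : p c
    · obtain ⟨h0, h1⟩ := hg c (List.mem_cons_self ..) hp
      rw [if_pos hp]
      rw [ih (fun x hx hpx => hg x (List.mem_cons_of_mem _ hx) hpx) _
        (by rw [PySem.List.length_pySetD, ha])]
      obtain ⟨m, hm⟩ : ∃ m : Nat, g c = (m : Int) := ⟨(g c).toNat, (Int.toNat_of_nonneg h0).symm⟩
      have hmn : m < a.length := by omega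
      rw [hm, PySem.List.pyGetD_pySetD_natCast a m j _ false hmn]
      simp only [List.filter_cons, if_pos hp, List.map_cons, List.mem_cons, hm]
      by_cases hje : j = m
      · subst hje
        simp
      · rw [if_neg hje]
        have : ¬ ((j : Int) = (m : Int)) := by omega
        simp [this]
    · rw [if_neg hp]
      rw [ih (fun x hx hpx => hg x (List.mem_cons_of_mem _ hx) hpx) _ ha]
      rw [List.filter_cons_of_neg (by simpa using hp)]

lemma pvDescCount (s : List Int) (hs : s.Pairwise (fun a b => b ≤ a)) (k : Nat) (hk : k < s.length) (v : Int) :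
    (v ≤ s[k]) ↔ (k + 1 ≤ s.countP (fun x => decide (v ≤ x))) := by
  have hget := List.pairwise_iff_getElem.1 hs
  have hsplit : ∀ m : Nat, s.countP (fun x => decide (v ≤ x))
      = (s.take m).countP (fun x => decide (v ≤ x)) + (s.drop m).countP (fun x => decide (v ≤ x)) := by
    intro m
    rw [← List.countP_append, List.take_append_drop]
  constructor
  · intro hv
    have htake : (s.take (k+1)).countP (fun x => decide (v ≤ x)) = (s.take (k+1)).length := by
      rw [List.countP_eq_length]
      intro x hx
      obtain ⟨i, hi, rfl⟩ := List.getElem_of_mem hx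
      rw [List.getElem_take]
      have hil : i < (List.take (k+1) s).length := hi
      rw [List.length_take] at hil
      simp only [decide_eq_true_eq]
      rcases Nat.lt_or_ge i k with hik | hik
      · exact le_trans hv (hget i k (by omega) hk hik)
      · have : i = k := by omega
        subst this
        exact hv
    have := hsplit (k+1)
    rw [htake, List.length_take] at this
    omega
  · intro hc
    by_contra hv
    rw [not_le] at hv
    have hdrop : (s.drop k).countP (fun x => decide (v ≤ x)) = 0 := by
      rw [List.countP_eq_zero]
      intro x hx
      obtain ⟨i, hi, rfl⟩ := List.getElem_of_mem hx
      rw [List.getElem_drop]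
      simp only [decide_eq_true_eq, not_le]
      rcases Nat.eq_zero_or_pos i with h0 | h0
      · subst h0
        simpa using hv
      · have hki : k + i < s.length := by
          have := hi
          rw [List.length_drop] at this
          omega
        exact lt_of_le_of_lt (hget k (k+i) hk hki (by omega)) hv
    have hlen : (s.take k).countP (fun x => decide (v ≤ x)) ≤ k := by
      calc (s.take k).countP (fun x => decide (v ≤ x)) ≤ (s.take k).length := List.countP_le_length
      _ ≤ k := by rw [List.length_take]; omega
    have := hsplit k
    omega

lemma pvMaxCount (l : List Int) (hne : l ≠ []) (v : Int) :
    (v ≤ (PySem.List.max? l (fun x => x)).getD 0) ↔ (1 ≤ l.countP (fun x => decide (v ≤ x))) := by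
  obtain ⟨m, hm⟩ : ∃ m, PySem.List.max? l (fun x => x) = some m := by
    cases h : PySem.List.max? l (fun x => x) with
    | none => exact absurd ((PySem.List.max?_eq_none_iff l _).1 h) hne
    | some m => exact ⟨m, rfl⟩
  rw [hm, Option.getD_some]
  constructor
  · intro hv
    have h1 : 0 < l.countP (fun x => decide (v ≤ x)) :=
      List.countP_pos_iff.2 ⟨m, PySem.List.max?_mem hm, by simpa using hv⟩
    omega
  · intro hc
    obtain ⟨x, hx, hpx⟩ := List.countP_pos_iff.1 (Nat.lt_of_lt_of_le Nat.one_pos hc)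
    exact le_trans (of_decide_eq_true hpx) (PySem.List.max?_isMax hm x hx)

lemma pvSortedCount (l : List Int) (k : Nat) (hk : k < l.length) (v : Int) :
    (v ≤ PySem.List.pyGetD (PySem.List.sorted l (fun x => x) true) (k : Int) 0)
      ↔ (k + 1 ≤ l.countP (fun x => decide (v ≤ x))) := by
  have hlen : (PySem.List.sorted l (fun x => x) true).length = l.length :=
    PySem.List.length_sorted ..
  rw [PySem.List.pyGetD_natCast, List.getD_eq_getElem _ _ (by omega)]
  rw [pvDescCount _ (PySem.List.sorted_pairwise_rev l (fun x => x)) k (by omega) v]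
  rw [(PySem.List.sorted_perm l (fun x => x) true).countP_eq]

lemma pvSortedSet (S : List Int) (hnd : S.Nodup) (hmem : ∀ r ∈ S, 0 ≤ r ∧ r < 13) :
    PySem.List.sorted S (fun x => x) true
      = List.filter (fun r => decide (r ∈ S)) [12,11,10,9,8,7,6,5,4,3,2,1,0] := by
  apply PySem.List.sorted_rev_eq_of_perm_of_pairwise_gt
  · rw [List.perm_ext_iff_of_nodup (List.Nodup.filter _ (by decide)) hnd]
    intro a
    simp only [List.mem_filter, decide_eq_true_eq]
    constructor
    · rintro ⟨_, h⟩; exact h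
    · intro h
      refine ⟨?_, h⟩
      have := hmem a h
      simp only [List.mem_cons, List.not_mem_nil, or_false]
      omega
  · exact List.Pairwise.sublist (List.filter_sublist) (by decide)

lemma pvFilter_eq_build (b : Int → Bool) (rs : List Int) :
    rs.filter (fun r => b r) = pvBuild (rs.map (fun r => (r, b r))) := by
  induction rs with
  | nil => rfl
  | cons r t ih =>
    simp only [List.filter_cons, List.map_cons, pvBuild]
    rw [ih]

lemma pvHasStraight_atoms (h : List Bool) (b : Int → Bool)
    (hb : ∀ r : Int, 0 ≤ r → r < 13 → PySem.List.pyGetD h r false = b r) :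
    pvHasStraight h = ((b 12 && b 0 && b 1 && b 2 && b 3) ||
      ((b 4 && b 3 && b 2 && b 1 && b 0) || ((b 5 && b 4 && b 3 && b 2 && b 1) ||
      ((b 6 && b 5 && b 4 && b 3 && b 2) || ((b 7 && b 6 && b 5 && b 4 && b 3) ||
      ((b 8 && b 7 && b 6 && b 5 && b 4) || ((b 9 && b 8 && b 7 && b 6 && b 5) ||
      ((b 10 && b 9 && b 8 && b 7 && b 6) || ((b 11 && b 10 && b 9 && b 8 && b 7) ||
      (b 12 && b 11 && b 10 && b 9 && b 8)))))))))) := by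
  have e : PySem.List.pyRange 4 13 1 = [4,5,6,7,8,9,10,11,12] := by decide
  unfold pvHasStraight
  rw [e]
  simp only [List.any_cons, List.any_nil, Bool.or_false]
  norm_num
  rw [hb 0 (by norm_num) (by norm_num), hb 1 (by norm_num) (by norm_num),
    hb 2 (by norm_num) (by norm_num), hb 3 (by norm_num) (by norm_num),
    hb 4 (by norm_num) (by norm_num), hb 5 (by norm_num) (by norm_num),
    hb 6 (by norm_num) (by norm_num), hb 7 (by norm_num) (by norm_num),
    hb 8 (by norm_num) (by norm_num), hb 9 (by norm_num) (by norm_num),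
    hb 10 (by norm_num) (by norm_num), hb 11 (by norm_num) (by norm_num),
    hb 12 (by norm_num) (by norm_num)]


lemma pvShift2 (c : Int) (h0 : 0 ≤ c) (h1 : c ≤ 51) : 0 ≤ c >>> (2:Nat) ∧ c >>> (2:Nat) < 13 := by
  rw [Int.shiftRight_eq_div_pow]
  norm_num
  omega

lemma pvFoldCnt (v : Int) (l : List Int) :
    l.foldl (fun acc n => if v ≤ n then acc + 1 else acc) (0:Int)
      = (l.countP (fun n => decide (v ≤ n)) : Int) := by
  have he : (fun (acc : Int) n => if v ≤ n then acc + 1 else acc)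
      = (fun (acc : Int) n => if (fun x => decide (v ≤ x)) n = true then acc + 1 else acc) := by
    funext acc n
    by_cases h : v ≤ n <;> simp [h]
  rw [he, PySem.List.foldl_if_add_one]
  simp

lemma pvMatchSome (o : Option Int) :
    (match o with
     | some t => some (if t = 12 then (9:Int) else 8)
     | none => none).isSome = o.isSome := by
  cases o <;> rfl

lemma pvMasterSome (x0 x1 x2 x3 x4 x5 x6 x7 x8 x9 x10 x11 x12 : Bool) :
    (pvScan5 (pvExtB [(12,x12),(11,x11),(10,x10),(9,x9),(8,x8),(7,x7),(6,x6),(5,x5),(4,x4),(3,x3),(2,x2),(1,x1),(0,x0)])).isSome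
      = ((x12 && x0 && x1 && x2 && x3) ||
        ((x4 && x3 && x2 && x1 && x0) || ((x5 && x4 && x3 && x2 && x1) ||
        ((x6 && x5 && x4 && x3 && x2) || ((x7 && x6 && x5 && x4 && x3) ||
        ((x8 && x7 && x6 && x5 && x4) || ((x9 && x8 && x7 && x6 && x5) ||
        ((x10 && x9 && x8 && x7 && x6) || ((x11 && x10 && x9 && x8 && x7) ||
        (x12 && x11 && x10 && x9 && x8)))))))))) := by
  rw [← pvMatchSome (pvScan5 (pvExtB [(12,x12),(11,x11),(10,x10),(9,x9),(8,x8),(7,x7),(6,x6),(5,x5),(4,x4),(3,x3),(2,x2),(1,x1),(0,x0)]))]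
  rw [pvMaster x0 x1 x2 x3 x4 x5 x6 x7 x8 x9 x10 x11 x12]
  cases x8 <;> cases x9 <;> cases x10 <;> cases x11 <;> cases x12 <;>
    (try simp) <;> (split_ifs with h <;> simp_all)

lemma pvGetD_replicate {α : Type} (n j : Nat) (d : α) :
    PySem.List.pyGetD (List.replicate n d) (j:Int) d = d := by
  rw [PySem.List.pyGetD_natCast]
  rcases Nat.lt_or_ge j n with h | h
  · rw [List.getD_eq_getElem _ _ (by simpa using h)]
    simp
  · rw [List.getD_eq_default _ _ (by simpa using h)]

theorem evaluate_py_spec : Claim_equal_evaluate_py := by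
  intro cards _hdom hpre
  show evaluate_py cards = evaluate_py_alt cards
  unfold evaluate_py evaluate_py_alt
  dsimp only
  rw [PySem.List.foldl_prod_mk
    (fun (a : List Int) (c:Int) => PySem.List.pySetD a (c >>> (2:Nat)) (PySem.List.pyGetD a (c >>> (2:Nat)) 0 + 1))
    (fun (a : List Int) (c:Int) => PySem.List.pySetD a (PySem.Int.band c 3) (PySem.List.pyGetD a (PySem.Int.band c 3) 0 + 1))
    cards (List.replicate 13 (0:Int)) (List.replicate 4 (0:Int))]
  rw [List.foldl_map, List.foldl_map]
  set rc := List.foldl (fun (x : List Int) (y:Int) => PySem.List.pySetD x (y >>> (2:Nat)) (PySem.List.pyGetD x (y >>> (2:Nat)) 0 + 1)) (List.replicate 13 (0:Int)) cards with hrcdef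
  set sc := List.foldl (fun (x : List Int) (y:Int) => PySem.List.pySetD x (PySem.Int.band y 3) (PySem.List.pyGetD x (PySem.Int.band y 3) 0 + 1)) (List.replicate 4 (0:Int)) cards with hscdef
  set fs : Int := (if 5 ≤ PySem.List.pyGetD sc 0 0 then 0 else if 5 ≤ PySem.List.pyGetD sc 1 0 then (1:Int) else if 5 ≤ PySem.List.pyGetD sc 2 0 then 2 else if 5 ≤ PySem.List.pyGetD sc 3 0 then 3 else -1) with hfsdef
  have hcb : ∀ c ∈ cards, 0 ≤ c ∧ c ≤ 51 := hpre
  have hgb : ∀ c ∈ cards, 0 ≤ c >>> (2:Nat) ∧ c >>> (2:Nat) < (13:Int) :=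
    fun c hc => pvShift2 c (hcb c hc).1 (hcb c hc).2
  have hrlen : rc.length = 13 := by
    rw [hrcdef, pvFoldIncr_len]
    simp
  have hrne : rc ≠ [] := by
    intro h
    rw [h] at hrlen
    simp at hrlen
  have hrcget : ∀ j : Nat, j < 13 →
      PySem.List.pyGetD rc (j:Int) 0 = ((cards.map (fun c : Int => c >>> (2:Nat))).count (j:Int) : Int) := by
    intro j hj
    rw [hrcdef, pvFoldIncr_getD (fun c : Int => c >>> (2:Nat)) 13 cards hgb _ (by simp) j hj,
      pvGetD_replicate]
    simp
  -- ============ the straight-flush / royal-flush block ============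
  have hsfeq : (if 0 ≤ fs then
      (match pvScan5 (PySem.List.sorted (PySem.Set.ofList ((cards.filter (fun c : Int => PySem.Int.band c 3 == fs)).map (fun c : Int => c >>> (2:Nat)))) (fun x => x) true ++
          (if (12:Int) ∈ PySem.List.sorted (PySem.Set.ofList ((cards.filter (fun c : Int => PySem.Int.band c 3 == fs)).map (fun c : Int => c >>> (2:Nat)))) (fun x => x) true then [-1] else [])) with
       | some t => some (if t = 12 then (9:Int) else 8)
       | none => none)
    else none) =
    (if 0 ≤ fs then
      (if PySem.List.pyGetD (cards.foldl (fun a (c:Int) => if PySem.Int.band c 3 == fs then PySem.List.pySetD a (c >>> (2:Nat)) true else a) (List.replicate 13 false)) 8 false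
          && PySem.List.pyGetD (cards.foldl (fun a (c:Int) => if PySem.Int.band c 3 == fs then PySem.List.pySetD a (c >>> (2:Nat)) true else a) (List.replicate 13 false)) 9 false
          && PySem.List.pyGetD (cards.foldl (fun a (c:Int) => if PySem.Int.band c 3 == fs then PySem.List.pySetD a (c >>> (2:Nat)) true else a) (List.replicate 13 false)) 10 false
          && PySem.List.pyGetD (cards.foldl (fun a (c:Int) => if PySem.Int.band c 3 == fs then PySem.List.pySetD a (c >>> (2:Nat)) true else a) (List.replicate 13 false)) 11 false
          && PySem.List.pyGetD (cards.foldl (fun a (c:Int) => if PySem.Int.band c 3 == fs then PySem.List.pySetD a (c >>> (2:Nat)) true else a) (List.replicate 13 false)) 12 false then some 9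
       else if pvHasStraight (cards.foldl (fun a (c:Int) => if PySem.Int.band c 3 == fs then PySem.List.pySetD a (c >>> (2:Nat)) true else a) (List.replicate 13 false)) then some 8
       else none)
    else none) := by
    by_cases hf : (0:Int) ≤ fs
    case neg => rw [if_neg hf, if_neg hf]
    rw [if_pos hf, if_pos hf]
    set lst := (cards.filter (fun c : Int => PySem.Int.band c 3 == fs)).map (fun c : Int => c >>> (2:Nat)) with hlst
    set Sf := PySem.Set.ofList lst with hSf
    set fh := cards.foldl (fun a (c:Int) => if PySem.Int.band c 3 == fs then PySem.List.pySetD a (c >>> (2:Nat)) true else a) (List.replicate 13 false) with hfh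
    have hmemS : ∀ r ∈ Sf, 0 ≤ r ∧ r < (13:Int) := by
      intro r hr
      have hr2 : r ∈ lst := (PySem.Set.mem_ofList lst r).1 hr
      obtain ⟨c, hc, rfl⟩ := List.mem_map.1 hr2
      exact hgb c (List.mem_of_mem_filter hc)
    have hsorted : PySem.List.sorted Sf (fun x => x) true
        = List.filter (fun r => decide (r ∈ Sf)) [12,11,10,9,8,7,6,5,4,3,2,1,0] :=
      pvSortedSet Sf (PySem.Set.nodup_ofList lst) hmemS
    rw [hsorted, pvFilter_eq_build (fun r => decide (r ∈ Sf)) [12,11,10,9,8,7,6,5,4,3,2,1,0]]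
    simp only [List.map_cons, List.map_nil]
    -- characterise fh
    have hfhget : ∀ r : Int, 0 ≤ r → r < 13 → PySem.List.pyGetD fh r false = decide (r ∈ Sf) := by
      intro r h0 h1
      obtain ⟨j, rfl⟩ : ∃ j : Nat, r = (j:Int) := ⟨r.toNat, (Int.toNat_of_nonneg h0).symm⟩
      rw [hfh, pvFoldMark_getD (fun c : Int => PySem.Int.band c 3 == fs) (fun c : Int => c >>> (2:Nat)) 13 cards
        (fun c hc _ => hgb c hc) _ (by simp) j (by omega), pvGetD_replicate]
      simp only [Bool.false_or]
      congr 1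
      rw [← hlst]
      exact propext (PySem.Set.mem_ofList lst _).symm
    rw [hfhget 8 (by norm_num) (by norm_num), hfhget 9 (by norm_num) (by norm_num),
      hfhget 10 (by norm_num) (by norm_num), hfhget 11 (by norm_num) (by norm_num),
      hfhget 12 (by norm_num) (by norm_num),
      pvHasStraight_atoms fh (fun r => decide (r ∈ Sf)) hfhget]
    exact pvMaster (decide ((0:Int) ∈ Sf)) (decide ((1:Int) ∈ Sf)) (decide ((2:Int) ∈ Sf)) (decide ((3:Int) ∈ Sf))
      (decide ((4:Int) ∈ Sf)) (decide ((5:Int) ∈ Sf)) (decide ((6:Int) ∈ Sf)) (decide ((7:Int) ∈ Sf))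
      (decide ((8:Int) ∈ Sf)) (decide ((9:Int) ∈ Sf)) (decide ((10:Int) ∈ Sf)) (decide ((11:Int) ∈ Sf))
      (decide ((12:Int) ∈ Sf))
  rw [hsfeq]
  congr 1
  -- ===== the fall-through chain =====
  have hq : (4 ≤ (PySem.List.max? rc (fun x => x)).getD 0)
      ↔ (1 ≤ List.foldl (fun acc n => if 4 ≤ n then acc + 1 else acc) (0:Int) rc) := by
    rw [pvFoldCnt 4 rc, pvMaxCount rc hrne 4]
    constructor <;> intro h <;> omega
  have h30 : (3 ≤ PySem.List.pyGetD (PySem.List.sorted rc (fun x => x) true) 0 0)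
      ↔ (1 ≤ List.foldl (fun acc n => if 3 ≤ n then acc + 1 else acc) (0:Int) rc) := by
    rw [pvFoldCnt 3 rc]
    have h := pvSortedCount rc 0 (by omega) 3
    simp only [Nat.cast_zero] at h
    rw [h]
    constructor <;> intro hx <;> omega
  have h20 : (2 ≤ PySem.List.pyGetD (PySem.List.sorted rc (fun x => x) true) 0 0)
      ↔ (1 ≤ List.foldl (fun acc n => if 2 ≤ n then acc + 1 else acc) (0:Int) rc) := by
    rw [pvFoldCnt 2 rc]
    have h := pvSortedCount rc 0 (by omega) 2
    simp only [Nat.cast_zero] at h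
    rw [h]
    constructor <;> intro hx <;> omega
  have h21 : (2 ≤ PySem.List.pyGetD (PySem.List.sorted rc (fun x => x) true) 1 0)
      ↔ (2 ≤ List.foldl (fun acc n => if 2 ≤ n then acc + 1 else acc) (0:Int) rc) := by
    rw [pvFoldCnt 2 rc]
    have h := pvSortedCount rc 1 (by omega) 2
    simp only [Nat.cast_one] at h
    rw [h]
    constructor <;> intro hx <;> omega
  have hstraight : (pvScan5 (PySem.List.sorted (PySem.Set.ofList (cards.map (fun c : Int => c >>> (2:Nat)))) (fun x => x) true ++
        (if (12:Int) ∈ PySem.List.sorted (PySem.Set.ofList (cards.map (fun c : Int => c >>> (2:Nat)))) (fun x => x) true then [-1] else []))).isSome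
      = pvHasStraight (rc.map (fun n => decide (0 < n))) := by
    have hmem2 : ∀ r ∈ PySem.Set.ofList (cards.map (fun c : Int => c >>> (2:Nat))), 0 ≤ r ∧ r < (13:Int) := by
      intro r hr
      obtain ⟨c, hc, rfl⟩ := List.mem_map.1 ((PySem.Set.mem_ofList _ r).1 hr)
      exact hgb c hc
    rw [pvSortedSet _ (PySem.Set.nodup_ofList _) hmem2,
      pvFilter_eq_build (fun r => decide (r ∈ PySem.Set.ofList (cards.map (fun c : Int => c >>> (2:Nat))))) [12,11,10,9,8,7,6,5,4,3,2,1,0]]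
    simp only [List.map_cons, List.map_nil]
    have hhget : ∀ r : Int, 0 ≤ r → r < 13 →
        PySem.List.pyGetD (rc.map (fun n => decide (0 < n))) r false
          = decide (r ∈ PySem.Set.ofList (cards.map (fun c : Int => c >>> (2:Nat)))) := by
      intro r h0 h1
      obtain ⟨j, rfl⟩ : ∃ j : Nat, r = (j:Int) := ⟨r.toNat, (Int.toNat_of_nonneg h0).symm⟩
      have hj13 : j < 13 := by omega
      have hjlen : j < (rc.map (fun n => decide (0 < n))).length := by
        rw [List.length_map, hrlen]
        exact hj13
      rw [PySem.List.pyGetD_natCast, List.getD_eq_getElem _ _ hjlen, List.getElem_map]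
      have hrj : rc[j] = PySem.List.pyGetD rc (j:Int) 0 := by
        rw [PySem.List.pyGetD_natCast, List.getD_eq_getElem _ _ (by omega)]
      rw [hrj, hrcget j hj13]
      have hiff : (0 < ((cards.map (fun c : Int => c >>> (2:Nat))).count (j:Int) : Int))
          ↔ ((j:Int) ∈ PySem.Set.ofList (cards.map (fun c : Int => c >>> (2:Nat)))) := by
        rw [PySem.Set.mem_ofList]
        constructor
        · intro h
          exact List.count_pos_iff.1 (by exact_mod_cast h)
        · intro h
          exact_mod_cast List.count_pos_iff.2 h
      simp only [hiff]
    rw [pvHasStraight_atoms _ _ hhget]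
    exact pvMasterSome (decide ((0:Int) ∈ PySem.Set.ofList (cards.map (fun c : Int => c >>> (2:Nat)))))
      (decide ((1:Int) ∈ PySem.Set.ofList (cards.map (fun c : Int => c >>> (2:Nat)))))
      (decide ((2:Int) ∈ PySem.Set.ofList (cards.map (fun c : Int => c >>> (2:Nat)))))
      (decide ((3:Int) ∈ PySem.Set.ofList (cards.map (fun c : Int => c >>> (2:Nat)))))
      (decide ((4:Int) ∈ PySem.Set.ofList (cards.map (fun c : Int => c >>> (2:Nat)))))
      (decide ((5:Int) ∈ PySem.Set.ofList (cards.map (fun c : Int => c >>> (2:Nat)))))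
      (decide ((6:Int) ∈ PySem.Set.ofList (cards.map (fun c : Int => c >>> (2:Nat)))))
      (decide ((7:Int) ∈ PySem.Set.ofList (cards.map (fun c : Int => c >>> (2:Nat)))))
      (decide ((8:Int) ∈ PySem.Set.ofList (cards.map (fun c : Int => c >>> (2:Nat)))))
      (decide ((9:Int) ∈ PySem.Set.ofList (cards.map (fun c : Int => c >>> (2:Nat)))))
      (decide ((10:Int) ∈ PySem.Set.ofList (cards.map (fun c : Int => c >>> (2:Nat)))))
      (decide ((11:Int) ∈ PySem.Set.ofList (cards.map (fun c : Int => c >>> (2:Nat)))))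
      (decide ((12:Int) ∈ PySem.Set.ofList (cards.map (fun c : Int => c >>> (2:Nat)))))
  simp only [hq, h30, h20, h21, hstraight]
  have hpp : ((1 ≤ List.foldl (fun acc n => if 2 ≤ n then acc + 1 else acc) (0:Int) rc)
      ∧ (2 ≤ List.foldl (fun acc n => if 2 ≤ n then acc + 1 else acc) (0:Int) rc))
      ↔ (2 ≤ List.foldl (fun acc n => if 2 ≤ n then acc + 1 else acc) (0:Int) rc) := by
    constructor
    · rintro ⟨_, h⟩
      exact h
    · intro h
      exact ⟨by omega, h⟩
  simp only [hpp]
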